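-- pv_equiv track=rewrite | github.com/rola-ob/MusicNotaion-FinalProject | chapter1.py | delete_extra_lines
-- ===== SOURCE A (Python) =====
-- def delete_extra_lines(lines_4):
--     # assuming that the gap between two keys is 3, and we have 52 keys, then: (1280-(53*3))/52 =~ 21
--     # 20 is the width of a single key
--     d = -20
--     c = 0
--     deleted_index = [-1]
--     for line_4 in lines_4:
--         if line_4[0] - d < 20:
--             deleted_index.append(c)
--         else:
--             d = line_4[0]
--         c += 1
--     deleted_index.reverse()
--     for i in deleted_index:
--         if i == -1:
--             break
--         lines_4.pop(i)
--     return lines_4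
-- ===== SOURCE B (Python) =====
-- # Single-pass filter: keep a line iff its first coord is >= 20 past the last
-- # kept one; replaces A's collect-indices-then-pop-each scheme with one pass.
-- # Like A, mutates lines_4 in place (here via slice assignment) and returns it.
-- def delete_extra_lines(lines_4):
--     d = -20
--     kept = []
--     for line in lines_4:
--         if line[0] - d < 20:
--             continue
--         d = line[0]
--         kept.append(line)
--     lines_4[:] = kept
--     return lines_4
-- ===== Notes on version B (the rewrite author's own statement) =====
-- stated objective: alternative
-- what changed: Replaces A's two-phase scheme (collect indices to delete, then pop each index from the list) with a single forward pass that appends the kept lines to a fresh list, same d-update rule.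
-- outside the precondition, e.g. on delete_extra_lines([[]]): A raises IndexError, B raises IndexError
import Mathlib
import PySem

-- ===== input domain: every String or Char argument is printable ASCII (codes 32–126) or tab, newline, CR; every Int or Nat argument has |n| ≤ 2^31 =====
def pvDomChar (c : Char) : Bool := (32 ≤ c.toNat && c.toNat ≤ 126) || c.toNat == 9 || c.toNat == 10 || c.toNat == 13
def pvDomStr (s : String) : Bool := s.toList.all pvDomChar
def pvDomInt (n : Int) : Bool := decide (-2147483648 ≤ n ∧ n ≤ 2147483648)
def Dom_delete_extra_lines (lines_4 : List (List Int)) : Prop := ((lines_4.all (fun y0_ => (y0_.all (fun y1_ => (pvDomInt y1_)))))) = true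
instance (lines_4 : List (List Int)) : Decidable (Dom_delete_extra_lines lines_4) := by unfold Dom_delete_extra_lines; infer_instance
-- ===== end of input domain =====

-- B replaces A's collect-deletion-indices-then-pop-each scheme with a single
-- forward pass (alternative decomposition) that keeps a line iff its first
-- coord is ≥ 20 past the last kept one.  Python A mutates lines_4 in place
-- (pops); Python B mirrors that with a slice assignment; the equivalence
-- proved here is about the return value.

-- ===== PORT A =====
-- line_4[0]; `.getD 0` is unreachable on Pre_ (Pre_ excludes empty sublists,
-- where Python raises IndexError)
def pvHeadA (l : List Int) : Int := (PySem.List.pyGet? l 0).getD 0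

-- first loop of A: threads (d, c, deleted_index), returns final deleted_index
def pvLoop1A : List (List Int) → Int → Int → List Int → List Int
  | [], _, _, del => del
  | l :: rest, d, c, del =>
    if pvHeadA l - d < 20 then pvLoop1A rest d (c + 1) (del ++ [c])
    else pvLoop1A rest (pvHeadA l) (c + 1) del

-- second loop of A: `for i in deleted_index: if i == -1: break; lines_4.pop(i)`
-- (`.getD lst` on a failed pop is unreachable: every collected index is in range)
def pvPopLoopA : List Int → List (List Int) → List (List Int)
  | [], lst => lst
  | i :: rest, lst =>
    if i = -1 then lst
    else pvPopLoopA rest (((PySem.List.pop? lst i).map (·.2)).getD lst)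

def delete_extra_lines (lines_4 : List (List Int)) : List (List Int) :=
  pvPopLoopA (pvLoop1A lines_4 (-20) 0 [-1]).reverse lines_4

-- ===== PORT B =====
def pvGoB : Int → List (List Int) → List (List Int)
  | _, [] => []
  | d, l :: rest =>
    if pvHeadA l - d < 20 then pvGoB d rest
    else l :: pvGoB (pvHeadA l) rest

def delete_extra_lines_alt (lines_4 : List (List Int)) : List (List Int) :=
  pvGoB (-20) lines_4

-- ===== PRECONDITION & SPEC =====
-- Pre_ excludes exactly the inputs containing an empty sublist, where Python A
-- raises IndexError on line_4[0].
def Pre_delete_extra_lines (lines_4 : List (List Int)) : Prop :=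
  ∀ l ∈ lines_4, l ≠ []
instance (lines_4 : List (List Int)) : Decidable (Pre_delete_extra_lines lines_4) := by
  unfold Pre_delete_extra_lines; infer_instance

def pvWitness_delete_extra_lines : List (List Int) := [[0, 1], [5], [40, 2]]

def Spec_delete_extra_lines (lines_4 : List (List Int)) (out : List (List Int)) : Prop := out = delete_extra_lines_alt lines_4
instance (lines_4 : List (List Int)) (out : List (List Int)) : Decidable (Spec_delete_extra_lines lines_4 out) := by unfold Spec_delete_extra_lines; infer_instance

-- ===== CLAIM (what is proved, stated in full; the proofs are below) =====
def Claim_equal_delete_extra_lines : Prop := ∀ (lines_4 : List (List Int)), Dom_delete_extra_lines lines_4 → Pre_delete_extra_lines lines_4 → Spec_delete_extra_lines lines_4 (delete_extra_lines lines_4)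

-- ===== LEMMAS AND PROOFS =====

-- proof-only spec of the indices A collects, as relative Nat indices
def pvCollect : List (List Int) → Int → List Nat
  | [], _ => []
  | l :: rest, d =>
    if pvHeadA l - d < 20 then 0 :: (pvCollect rest d).map (· + 1)
    else (pvCollect rest (pvHeadA l)).map (· + 1)

theorem pvMapShift (M : List Nat) (c : Int) :
    List.map (fun n : Nat => (n : Int) + c) (M.map (fun x => x + 1))
      = List.map (fun n : Nat => (n : Int) + (c + 1)) M := by
  rw [List.map_map]
  apply List.map_congr_left
  intro n _
  simp [Function.comp]
  ring

theorem pvLoop1A_eq (xs : List (List Int)) :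
    ∀ (d c : Int) (del : List Int),
      pvLoop1A xs d c del = del ++ (pvCollect xs d).map (fun n : Nat => (n : Int) + c) := by
  induction xs with
  | nil => intro d c del; simp [pvLoop1A, pvCollect]
  | cons l rest ih =>
    intro d c del
    simp only [pvLoop1A, pvCollect]
    split
    · rw [ih]
      simp
      intro a _
      ring
    · rw [ih, pvMapShift]

theorem pvPopLoopA_append (as bs : List Int) (lst : List (List Int))
    (h : ∀ i ∈ as, i ≠ -1) :
    pvPopLoopA (as ++ bs) lst = pvPopLoopA bs (pvPopLoopA as lst) := by
  induction as generalizing lst with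
  | nil => simp [pvPopLoopA]
  | cons a rest ih =>
    simp only [List.cons_append, pvPopLoopA]
    rw [if_neg (h a (by simp))]
    rw [if_neg (h a (by simp))]
    exact ih _ (fun i hi => h i (List.mem_cons_of_mem _ hi))

theorem pvPopNone (xs : List (List Int)) (n : Nat) (h : ¬ n < xs.length) :
    PySem.List.pop? xs (n : Int) = none := by
  simp [PySem.List.pop?, PySem.List.pyIdx?]
  omega

theorem pvPop_cons_succ (x : List Int) (xs : List (List Int)) (n : Nat) :
    ((PySem.List.pop? (x :: xs) ((n : Int) + 1)).map (·.2)).getD (x :: xs)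
      = x :: ((PySem.List.pop? xs (n : Int)).map (·.2)).getD xs := by
  by_cases h : n < xs.length
  · rw [PySem.List.pop?_natCast _ _ h]
    have h2 : (n + 1 : Nat) < (x :: xs).length := by simpa using Nat.succ_lt_succ h
    have hc : ((n : Int) + 1) = ((n + 1 : Nat) : Int) := by push_cast; ring
    rw [hc, PySem.List.pop?_natCast _ _ h2]
    simp [List.eraseIdx]
  · have h2 : ¬ (n + 1 : Nat) < (x :: xs).length := by simpa using h
    have hc : ((n : Int) + 1) = ((n + 1 : Nat) : Int) := by push_cast; ring
    rw [hc, pvPopNone _ _ h2, pvPopNone _ _ h]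
    simp

-- popping indices that are all ≥ 1 never touches the head
theorem pvPopLoopA_shift (js : List Nat) (x : List Int) (xs : List (List Int)) :
    pvPopLoopA (js.map (fun n : Nat => (n : Int) + 1)) (x :: xs)
      = x :: pvPopLoopA (js.map (fun n : Nat => (n : Int))) xs := by
  induction js generalizing xs with
  | nil => simp [pvPopLoopA]
  | cons j rest ih =>
    simp only [List.map_cons, pvPopLoopA]
    rw [if_neg (by omega : ((j : Int) + 1) ≠ -1), if_neg (by omega : ((j : Int)) ≠ -1),
        pvPop_cons_succ]
    rw [ih]

theorem pvNoNegOne (M : List Nat) (i : Int)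
    (hi : i ∈ M.map (fun n : Nat => (n : Int))) : i ≠ -1 := by
  simp only [List.mem_map] at hi
  obtain ⟨n, _, rfl⟩ := hi; omega

theorem pvNoNegOne1 (M : List Nat) (i : Int)
    (hi : i ∈ M.map (fun n : Nat => (n : Int) + 1)) : i ≠ -1 := by
  simp only [List.mem_map] at hi
  obtain ⟨n, _, rfl⟩ := hi; omega

-- strip the trailing [-1] sentinel and commute reverse with the cast map
theorem pvIH_strip (M : List Nat) (rest : List (List Int)) :
    pvPopLoopA ((M.map (fun n : Nat => (n : Int))).reverse ++ [-1]) rest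
      = pvPopLoopA (M.reverse.map (fun n : Nat => (n : Int))) rest := by
  rw [← List.map_reverse,
      pvPopLoopA_append _ _ _ (pvNoNegOne M.reverse)]
  simp [pvPopLoopA]

theorem pvRevShift (M : List Nat) :
    ((M.map (· + 1)).map (fun n : Nat => (n : Int))).reverse
      = M.reverse.map (fun n : Nat => (n : Int) + 1) := by
  rw [← List.map_reverse, ← List.map_reverse, List.map_map]
  apply List.map_congr_left
  intro n _
  simp

theorem pvMain (xs : List (List Int)) :
    ∀ d : Int,
      pvPopLoopA (((pvCollect xs d).map (fun n : Nat => (n : Int))).reverse ++ [-1]) xs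
        = pvGoB d xs := by
  induction xs with
  | nil => intro d; simp [pvCollect, pvGoB, pvPopLoopA]
  | cons l rest ih =>
    intro d
    have ih' : ∀ d' : Int,
        pvPopLoopA ((pvCollect rest d').reverse.map (fun n : Nat => (n : Int))) rest
          = pvGoB d' rest := by
      intro d'; rw [← pvIH_strip]; exact ih d'
    simp only [pvCollect, pvGoB]
    split
    · rw [List.map_cons, List.reverse_cons, pvRevShift, List.append_assoc,
          pvPopLoopA_append _ _ _ (pvNoNegOne1 _), pvPopLoopA_shift, ih']
      simp [pvPopLoopA, PySem.List.pop?_zero_cons]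
    · rw [pvRevShift, pvPopLoopA_append _ _ _ (pvNoNegOne1 _), pvPopLoopA_shift, ih']
      simp [pvPopLoopA]

-- ===== VERDICT (by name: the statement is the Claim_ definition above) =====
theorem delete_extra_lines_spec : Claim_equal_delete_extra_lines := by
  intro lines_4 _ _
  unfold Spec_delete_extra_lines delete_extra_lines delete_extra_lines_alt
  rw [pvLoop1A_eq, ← pvMain lines_4 (-20)]
  simp
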